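-- pv_equiv track=rewrite | github.com/islomar/algorithms-and-data-structures | algorithms/algorithms-in-python/prefix_sum/test_continuous_array.py | find_max_length_brute_force
-- ===== SOURCE A (Python) =====
-- def find_max_length_brute_force(nums: list[int]) -> int:
--     continuous_numbers_array = []
--     index = 0
--     while index < len(nums):
--         current_value = nums[index]
--         number_of_equal_numbers = 0
--         while index < len(nums) and current_value == nums[index]:
--             number_of_equal_numbers += 1
--             index += 1
--         continuous_numbers_array.append(number_of_equal_numbers)
--
--     results = []
--     for index in range(len(continuous_numbers_array) - 1):
--         results.append(min(continuous_numbers_array[index], continuous_numbers_array[index + 1]))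
--     return 2 * max(results)
-- ===== SOURCE B (Python) =====
-- def find_max_length_brute_force(nums: list[int]) -> int:
--     # Single fused pass: maintain current run length, previous run length and best min.
--     best = None
--     prev = None
--     cur = 0
--     last = None
--     for x in nums:
--         if cur and x == last:
--             cur += 1
--         else:
--             if cur:
--                 if prev is not None:
--                     m = min(prev, cur)
--                     best = m if best is None or m > best else best
--                 prev = cur
--             cur = 1
--             last = x
--     if prev is not None:
--         m = min(prev, cur)
--         best = m if best is None or m > best else best
--     if best is None:
--         raise ValueError("fewer than two runs")
--     return 2 * best
-- ===== Notes on version B (the rewrite author's own statement) =====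
-- stated objective: faster
-- what changed: B fuses A's two phases (building the run-length list, then scanning adjacent pairs) into one fold over nums that keeps only the current run length, the previous run length and the running best, in one pass and O(1) extra space.
-- outside the precondition, e.g. on find_max_length_brute_force([]): A raises ValueError, B raises ValueError; on find_max_length_brute_force([1, 1, 1]): A raises ValueError, B raises ValueError
import Mathlib
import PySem

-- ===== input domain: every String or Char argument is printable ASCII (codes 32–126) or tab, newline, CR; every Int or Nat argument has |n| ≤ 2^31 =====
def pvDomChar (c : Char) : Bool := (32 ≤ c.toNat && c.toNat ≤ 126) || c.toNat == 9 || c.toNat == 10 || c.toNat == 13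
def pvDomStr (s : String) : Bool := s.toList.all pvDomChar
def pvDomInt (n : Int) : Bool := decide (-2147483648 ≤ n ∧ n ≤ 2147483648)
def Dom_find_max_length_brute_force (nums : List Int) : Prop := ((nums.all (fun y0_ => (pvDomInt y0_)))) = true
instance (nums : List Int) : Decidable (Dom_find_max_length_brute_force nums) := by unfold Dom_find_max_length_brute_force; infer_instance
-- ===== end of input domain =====

-- B fuses A's two passes (run-length list, then adjacent-pair mins) into one O(1)-space fold; return values agree wherever A returns (both raise ValueError when nums has fewer than two runs).

-- ===== PORT A =====
-- inner while loop: count the leading elements equal to v, return (count, remainder)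
def pvTakeRun (v : Int) : List Int → Int × List Int
  | [] => (0, [])
  | y :: ys => if v = y then ((pvTakeRun v ys).1 + 1, (pvTakeRun v ys).2) else (0, y :: ys)

theorem pvTakeRun_len (v : Int) (l : List Int) : (pvTakeRun v l).2.length ≤ l.length := by
  induction l with
  | nil => simp [pvTakeRun]
  | cons y ys ih =>
    simp only [pvTakeRun]
    split_ifs with h
    · simp; omega
    · simp

-- outer while loop: the list of run lengths (continuous_numbers_array)
def pvRuns : List Int → List Int
  | [] => []
  | x :: xs => ((pvTakeRun x xs).1 + 1) :: pvRuns (pvTakeRun x xs).2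
termination_by l => l.length
decreasing_by
  have := pvTakeRun_len x xs
  simp; omega

-- the 'for index in range(len-1)' loop over adjacent pairs, ported as structural
-- recursion on the run list; exact since every index 0..len-2 is in range
def pvAdjMins : List Int → List Int
  | a :: b :: t => min a b :: pvAdjMins (b :: t)
  | _ => []

-- Python max(results); max([]) raises ValueError there (excluded by Pre_), 0 is a junk default
def pvMaxD : List Int → Int
  | [] => 0
  | h :: t => t.foldl (fun a b => max a b) h

def find_max_length_brute_force (nums : List Int) : Int :=
  2 * pvMaxD (pvAdjMins (pvRuns nums))

-- ===== PORT B =====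
-- best = m if best is None or m > best else best
def pvUpd (b : Option Int) (m : Int) : Option Int :=
  match b with
  | none => some m
  | some bb => some (max bb m)

-- loop body; state = (best, prev, cur, last) (last is meaningful only when cur ≠ 0)
def pvStep (s : Option Int × Option Int × Int × Int) (x : Int) : Option Int × Option Int × Int × Int :=
  let (b, p, c, l) := s
  if c ≠ 0 ∧ x = l then (b, p, c + 1, l)
  else if c ≠ 0 then
    match p with
    | none => (b, some c, 1, x)
    | some pp => (pvUpd b (min pp c), some c, 1, x)
  else (b, p, 1, x)

-- the finalization after the loop
def pvFin (b p : Option Int) (c : Int) : Option Int :=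
  match p with
  | none => b
  | some pp => pvUpd b (min pp c)

def find_max_length_brute_force_alt (nums : List Int) : Int :=
  let st := nums.foldl pvStep (none, none, 0, 0)
  match pvFin st.1 st.2.1 st.2.2.1 with
  | none => 0   -- Python B raises ValueError here (excluded by Pre_)
  | some best => 2 * best

-- ===== PRECONDITION & SPEC =====
-- Pre_ excludes exactly the inputs with fewer than two maximal runs (empty or all-equal
-- lists): there Python A raises ValueError from max([]) (and Python B raises too).
def Pre_find_max_length_brute_force (nums : List Int) : Prop :=
  ((nums.zip nums.tail).any (fun p => decide (p.1 ≠ p.2))) = true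
instance (nums : List Int) : Decidable (Pre_find_max_length_brute_force nums) := by
  unfold Pre_find_max_length_brute_force; infer_instance

def pvWitness_find_max_length_brute_force : List Int := [0, 0, 1]

def Spec_find_max_length_brute_force (nums : List Int) (out : Int) : Prop := out = find_max_length_brute_force_alt nums
instance (nums : List Int) (out : Int) : Decidable (Spec_find_max_length_brute_force nums out) := by unfold Spec_find_max_length_brute_force; infer_instance

-- ===== CLAIM (what is proved, stated in full; the proofs are below) =====
def Claim_equal_find_max_length_brute_force : Prop := ∀ (nums : List Int), Dom_find_max_length_brute_force nums → Pre_find_max_length_brute_force nums → Spec_find_max_length_brute_force nums (find_max_length_brute_force nums)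

-- ===== LEMMAS AND PROOFS =====

-- abstract view of B's fold once the input is resolved into run lengths
def pvG : Option Int → Option Int → Int → List Int → Option Int
  | b, p, c, [] => pvFin b p c
  | b, p, c, r :: rs =>
    match p with
    | none => pvG b (some c) r rs
    | some pp => pvG (pvUpd b (min pp c)) (some c) r rs

theorem foldl_pvUpd_some (ms : List Int) (b : Int) :
    List.foldl pvUpd (some b) ms = some (List.foldl (fun a c => max a c) b ms) := by
  induction ms generalizing b with
  | nil => rfl
  | cons m ms ih => simp [List.foldl, pvUpd, ih]

theorem pvG_some (rs : List Int) (b : Option Int) (pp c : Int) :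
    pvG b (some pp) c rs = List.foldl pvUpd b (min pp c :: pvAdjMins (c :: rs)) := by
  induction rs generalizing b pp c with
  | nil => simp [pvG, pvFin, pvAdjMins, List.foldl]
  | cons r rs ih => simp [pvG, pvAdjMins, List.foldl, ih]

theorem pvFold_main (l : List Int) : ∀ (b p : Option Int) (c v : Int), 1 ≤ c →
    pvFin (List.foldl pvStep (b, p, c, v) l).1 (List.foldl pvStep (b, p, c, v) l).2.1
        (List.foldl pvStep (b, p, c, v) l).2.2.1
      = pvG b p (c + (pvTakeRun v l).1) (pvRuns (pvTakeRun v l).2) := by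
  induction l with
  | nil =>
    intro b p c v hc
    simp only [List.foldl, pvTakeRun, add_zero]
    simp [pvRuns, pvG]
  | cons y ys ih =>
    intro b p c v hc
    by_cases h : v = y
    · subst h
      have hstep : pvStep (b, p, c, v) v = (b, p, c + 1, v) := by
        simp [pvStep]; omega
      have htr : pvTakeRun v (v :: ys) = ((pvTakeRun v ys).1 + 1, (pvTakeRun v ys).2) := by
        simp [pvTakeRun]
      rw [htr]
      simp only [List.foldl, hstep]
      rw [ih b p (c + 1) v (by omega)]
      ring_nf
    · have hyv : ¬ y = v := fun hy => h hy.symm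
      have hne : c ≠ 0 := by omega
      have htr : pvTakeRun v (y :: ys) = (0, y :: ys) := by
        simp [pvTakeRun, h]
      rw [htr]
      have hruns : pvRuns (y :: ys) = ((pvTakeRun y ys).1 + 1) :: pvRuns (pvTakeRun y ys).2 := by
        simp only [pvRuns]
      cases p with
      | none =>
        have hstep : pvStep (b, none, c, v) y = (b, some c, 1, y) := by
          simp [pvStep, hne, hyv]
        simp only [List.foldl, hstep]
        rw [ih b (some c) 1 y (by omega), hruns]
        simp only [pvG, add_zero]
        ring_nf
      | some pp =>
        have hstep : pvStep (b, some pp, c, v) y = (pvUpd b (min pp c), some c, 1, y) := by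
          simp [pvStep, hne, hyv]
        simp only [List.foldl, hstep]
        rw [ih (pvUpd b (min pp c)) (some c) 1 y (by omega), hruns]
        simp only [pvG, add_zero]
        ring_nf

theorem ab_eq (nums : List Int) :
    find_max_length_brute_force nums = find_max_length_brute_force_alt nums := by
  cases nums with
  | nil =>
    simp [find_max_length_brute_force, find_max_length_brute_force_alt, pvRuns,
      pvAdjMins, pvMaxD, pvFin, List.foldl]
  | cons x xs =>
    have hstep : pvStep (none, none, 0, 0) x = (none, none, 1, x) := by
      simp [pvStep]
    have hruns : pvRuns (x :: xs) = ((pvTakeRun x xs).1 + 1) :: pvRuns (pvTakeRun x xs).2 := by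
      simp only [pvRuns]
    unfold find_max_length_brute_force find_max_length_brute_force_alt
    simp only [List.foldl, hstep, hruns]
    rw [pvFold_main xs none none 1 x (by omega)]
    rw [show (1 : Int) + (pvTakeRun x xs).1 = (pvTakeRun x xs).1 + 1 from by ring]
    cases hrs : pvRuns (pvTakeRun x xs).2 with
    | nil => simp [pvG, pvFin, pvAdjMins, pvMaxD]
    | cons r2 rs =>
      simp only [pvG, pvG_some, pvAdjMins, List.foldl, pvUpd, foldl_pvUpd_some, pvMaxD]

-- ===== VERDICT (by name: the statement is the Claim_ definition above) =====
theorem find_max_length_brute_force_spec : Claim_equal_find_max_length_brute_force := by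
  intro nums _ _
  unfold Spec_find_max_length_brute_force
  exact ab_eq nums
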